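-- pv_equiv track=rewrite | github.com/pradeepburugu/competitive_programming | competetiveprogramming/Exam/Keys.py | function
-- ===== SOURCE A (Python) =====
-- def function(list1):
-- 	list2=[]
--
-- 	for i in range(1,len(list1)):
-- 		list2.append(i)
--
-- 	for i in range(len(list1)):
-- 		for j in list1[i]:
-- 			if j in list2 and j!=i:
-- 				list2.remove(j)
-- 	return len(list2)==0
-- ===== SOURCE B (Python) =====
-- def function(list1):
--     n = len(list1)
--     return all(any(v in list1[i] for i in range(n) if i != v)
--                for v in range(1, n))
-- ===== Notes on version B (the rewrite author's own statement) =====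
-- stated objective: simpler
-- what changed: Instead of materialising the list [1..n-1] and destructively removing each value found while scanning all rows (A), B does a per-target existence check: for every required value v it asks whether some row list1[i] with i != v contains v, as a single all/any comprehension with no mutable remaining-list.
import Mathlib
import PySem

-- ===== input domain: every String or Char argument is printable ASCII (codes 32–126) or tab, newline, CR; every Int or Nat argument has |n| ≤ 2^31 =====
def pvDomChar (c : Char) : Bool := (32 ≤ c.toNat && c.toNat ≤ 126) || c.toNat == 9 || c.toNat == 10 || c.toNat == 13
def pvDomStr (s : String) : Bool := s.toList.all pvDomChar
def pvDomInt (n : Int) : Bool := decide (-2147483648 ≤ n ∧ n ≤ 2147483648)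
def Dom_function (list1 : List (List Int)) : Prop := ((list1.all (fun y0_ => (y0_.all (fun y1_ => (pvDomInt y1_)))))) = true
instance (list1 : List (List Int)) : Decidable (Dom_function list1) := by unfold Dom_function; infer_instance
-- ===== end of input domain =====

-- B replaces A's mutable remaining-list marking with a per-target all/any existence check (simpler decomposition, same cost class).


-- ===== PORT A =====
-- A's inner-loop body, named so the proofs can speak about it:
-- 'if j in list2 and j != i: list2.remove(j)'
def pvStep (i : Int) (l2 : List Int) (j : Int) : List Int :=
  if l2.contains j && j != i then (PySem.List.remove? l2 j).getD l2 else l2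

def function (list1 : List (List Int)) : Bool :=
  let list2 : List Int :=
    (PySem.List.pyRange 1 (list1.length : Int) 1).foldl (fun acc i => acc ++ [i]) []
  let list2 :=
    (PySem.List.pyRange 0 (list1.length : Int) 1).foldl
      (fun l2 i => (PySem.List.pyGetD list1 i []).foldl (pvStep i) l2)
      list2
  list2.length == 0

-- ===== PORT B =====
def function_alt (list1 : List (List Int)) : Bool :=
  let n : Int := list1.length
  (PySem.List.pyRange 1 n 1).all (fun v =>
    (PySem.List.pyRange 0 n 1).any (fun i =>
      i != v && (PySem.List.pyGetD list1 i []).contains v))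

-- ===== PRECONDITION & SPEC =====
def Spec_function (list1 : List (List Int)) (out : Bool) : Prop := out = function_alt list1
instance (list1 : List (List Int)) (out : Bool) : Decidable (Spec_function list1 out) := by unfold Spec_function; infer_instance

-- ===== CLAIM (what is proved, stated in full; the proofs are below) =====
def Claim_equal_function : Prop := ∀ (list1 : List (List Int)), Dom_function list1 → Spec_function list1 (function list1)

-- ===== LEMMAS AND PROOFS =====

-- The inner loop on a duplicate-free remaining list is a filter.
lemma inner_eq (i : Int) (row : List Int) : ∀ (l2 : List Int), l2.Nodup →
    row.foldl (pvStep i) l2 = l2.filter (fun v => !(row.contains v && v != i)) := by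
  induction row with
  | nil => intro l2 _; simp
  | cons j row ih =>
    intro l2 h
    simp only [List.foldl_cons]
    by_cases hc : (l2.contains j && j != i) = true
    · have hj : j ∈ l2 := by
        have := ((Bool.and_eq_true _ _).mp hc).1
        simpa using this
      have hji : (j != i) = true := ((Bool.and_eq_true _ _).mp hc).2
      have hstep : pvStep i l2 j = l2.filter (fun v => v != j) := by
        simp only [pvStep, hc, if_pos]
        rw [PySem.List.remove?_eq_some_erase l2 j hj]
        simp [List.Nodup.erase_eq_filter h, bne]
      rw [hstep, ih _ (List.Nodup.filter _ h), List.filter_filter]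
      apply List.filter_congr
      intro v _
      by_cases hv : v = j
      · subst hv; simp [hji]
      · simp [bne, hv]
    · have hstep : pvStep i l2 j = l2 := by
        simp only [pvStep]; rw [if_neg hc]
      rw [hstep, ih _ h]
      apply List.filter_congr
      intro v hv
      rcases Bool.and_eq_false_iff.mp (Bool.eq_false_iff.mpr hc) with hni | hji
      · -- j not in l2, so v ≠ j for v ∈ l2
        have hvj : v ≠ j := by
          intro e; subst e
          simp [List.contains_eq_mem, hv] at hni
        simp [hvj]
      · -- j = i
        have hj : j = i := by simpa [bne] using hji
        by_cases hvj : v = j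
        · subst hvj; simp [hj]
        · simp [hvj]

-- The outer loop over the enumerated rows is a filter by non-coverage.
lemma outer_eq (rows : List (List Int)) : ∀ (s : Int) (l2 : List Int), l2.Nodup →
    (PySem.List.enumerate rows s).foldl (fun l2 p => p.2.foldl (pvStep p.1) l2) l2
      = l2.filter (fun v =>
          !((PySem.List.enumerate rows s).any (fun p => p.2.contains v && v != p.1))) := by
  induction rows with
  | nil => intro s l2 _; simp [PySem.List.enumerate_nil]
  | cons r rows ih =>
    intro s l2 h
    rw [PySem.List.enumerate_cons]
    simp only [List.foldl_cons]
    rw [inner_eq s r l2 h, ih (s+1) _ (List.Nodup.filter _ h), List.filter_filter]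
    apply List.filter_congr
    intro v _
    simp [List.any_cons, Bool.not_or, Bool.and_comm]

-- covered-by-some-enumerated-row equals B's any over the index range
lemma any_eq (list1 : List (List Int)) (v : Int) :
    (PySem.List.enumerate list1 0).any (fun p => p.2.contains v && v != p.1)
      = (PySem.List.pyRange 0 (list1.length : Int) 1).any (fun i =>
          i != v && (PySem.List.pyGetD list1 i []).contains v) := by
  rw [PySem.List.enumerate_eq_map_pyRange list1 ([] : List Int), List.any_map]
  simp only [PySem.List.len_eq]
  apply PySem.List.any_congr_mem
  intro i _
  by_cases h : v = i
  · simp [h]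
  · have h1 : (v == i) = false := by simpa using h
    have h2 : (i == v) = false := by simpa using Ne.symm h
    simp [bne, h1, h2]

-- (filter p l).length == 0 iff every element fails p
lemma length_filter_beq_zero (l : List Int) (p : Int → Bool) :
    ((l.filter p).length == 0) = l.all (fun v => !(p v)) := by
  rw [Bool.eq_iff_iff]
  simp only [beq_iff_eq, List.length_eq_zero_iff, List.filter_eq_nil_iff, List.all_eq_true]
  constructor
  · intro h v hv; simpa using h v hv
  · intro h v hv; simpa using h v hv

-- A computed through the enumerate form
lemma function_eq (list1 : List (List Int)) :
    function list1
      = (((PySem.List.enumerate list1 0).foldl (fun l2 p => p.2.foldl (pvStep p.1) l2)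
          (PySem.List.pyRange 1 (list1.length : Int) 1)).length == 0) := by
  unfold function
  rw [PySem.List.foldl_append_singleton_eq_self, List.nil_append,
      PySem.List.enumerate_eq_map_pyRange list1 ([] : List Int), List.foldl_map]
  simp only [PySem.List.len_eq]

-- ===== VERDICT (by name: the statement is the Claim_ definition above) =====
theorem function_spec : Claim_equal_function := by
  intro list1 _
  unfold Spec_function function_alt
  show _ = (PySem.List.pyRange 1 (list1.length : Int) 1).all (fun v =>
    (PySem.List.pyRange 0 (list1.length : Int) 1).any (fun i =>
      i != v && (PySem.List.pyGetD list1 i []).contains v))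
  rw [function_eq, outer_eq list1 0 _ (PySem.List.nodup_pyRange_one 1 _),
      length_filter_beq_zero]
  congr 1
  funext v
  rw [Bool.not_not, any_eq]
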